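-- pv_equiv track=rewrite | github.com/AaronATW/CS61A | exam/skeleton/q3/q3.py | maxkd
-- ===== SOURCE A (Python) =====
-- def maxkd(meteor, k):
--     """
--     Given a number `meteor`, finds the largest number of length `k` or fewer,
--     composed of digits from `meteor`, in order.
--
--     >>> maxkd(1234, 1)
--     4
--     >>> maxkd(32749, 2)
--     79
--     >>> maxkd(1917, 2)
--     97
--     >>> maxkd(32749, 18)
--     32749
--     """
--     if k == 0:
--         return 0
--     if meteor < 10 ** k:
--         return meteor
--     a = meteor // 10
--     b = meteor % 10
--     return max(maxkd(a, k), maxkd(a, k - 1) * 10 + b)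
-- ===== SOURCE B (Python) =====
-- def maxkd(meteor, k):
--     """Largest number of length k or fewer made of digits of meteor, in order.
--
--     Bottom-up DP over (digit position, length budget) instead of A's
--     exponential branching recursion.
--     """
--     if k <= 0:
--         return 0
--     if meteor < 10 ** k:
--         return meteor
--     # here meteor >= 10**k >= 10, so meteor is positive with more than k digits
--     digits = []
--     m = meteor
--     while m:
--         digits.append(m % 10)
--         m //= 10
--     digits.reverse()
--     row = [0] * (k + 1)   # row[j] = best value of length <= j from the first i digits
--     prefix = 0
--     i = 0
--     for d in digits:
--         i += 1
--         prefix = prefix * 10 + d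
--         new = [0] * (k + 1)
--         for j in range(1, k + 1):
--             if i <= j:
--                 new[j] = prefix
--             else:
--                 new[j] = max(row[j], row[j - 1] * 10 + d)
--         row = new
--     return row[k]
-- ===== Notes on version B (the rewrite author's own statement) =====
-- stated objective: alternative
-- what changed: Replaces A's exponential branching recursion over (meteor, k) by a bottom-up dynamic-programming table row[j] over the digit positions of meteor (row[j] = best value of length <= j from the first i digits), computed in one pass over the digits. Pre_ excludes negative k (a negative length budget, outside the natural domain), where A's result comes from comparing an int with the float 10**k and A raises RecursionError once that float underflows to 0.0; B returns 0 there.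
-- outside the precondition, e.g. on maxkd(5, -1): A returns 5, B returns 0; on maxkd(-3, -2): A returns -3, B returns 0
import Mathlib
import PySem

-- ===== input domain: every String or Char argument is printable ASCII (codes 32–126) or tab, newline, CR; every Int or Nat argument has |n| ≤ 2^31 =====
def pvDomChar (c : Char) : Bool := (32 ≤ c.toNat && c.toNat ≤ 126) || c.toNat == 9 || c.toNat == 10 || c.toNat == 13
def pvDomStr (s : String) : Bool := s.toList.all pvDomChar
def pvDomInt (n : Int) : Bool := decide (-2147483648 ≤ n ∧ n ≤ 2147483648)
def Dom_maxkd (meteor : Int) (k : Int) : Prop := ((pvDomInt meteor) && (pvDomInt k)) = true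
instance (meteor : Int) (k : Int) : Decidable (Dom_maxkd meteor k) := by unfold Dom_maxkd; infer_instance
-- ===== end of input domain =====

-- B replaces A's exponential branching recursion by a bottom-up DP row over the digit
-- positions of meteor (an alternative algorithm; equal return values proved for k ≥ 0).

-- ===== PORT A =====
-- Python's test `meteor < 10 ** k`: for k ≥ 0 an exact integer power; for k < 0 Python compares
-- with the positive float 10.0**k, below which an integer lies iff it is ≤ 0 (exact whenever
-- that float is nonzero, i.e. k ≥ -323; for k ≤ -324 it underflows to 0.0 and A recurses
-- forever instead of returning — those inputs lie outside Pre_maxkd below; B returns 0 there).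
def pyLtPow10 (meteor k : Int) : Bool :=
  if 0 ≤ k then decide (meteor < 10 ^ k.toNat) else decide (meteor ≤ 0)

-- termination of A's recursion: `meteor // 10` shrinks |meteor| when 1 ≤ meteor
lemma floordiv10_natAbs_lt (m : Int) (h : 1 ≤ m) :
    (PySem.Int.floordiv m 10).natAbs < m.natAbs := by
  rw [PySem.Int.floordiv_eq_ediv_of_pos (by norm_num)]
  omega

lemma one_le_of_not_pyLtPow10 (meteor k : Int) (h : ¬ pyLtPow10 meteor k = true) :
    1 ≤ meteor := by
  unfold pyLtPow10 at h
  by_cases hk : 0 ≤ k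
  · rw [if_pos hk] at h
    have : (1 : Int) ≤ 10 ^ k.toNat := one_le_pow₀ (by norm_num)
    simp only [decide_eq_true_eq] at h
    omega
  · rw [if_neg hk] at h
    simp only [decide_eq_true_eq] at h
    omega

def maxkd (meteor : Int) (k : Int) : Int :=
  if k = 0 then 0
  else if pyLtPow10 meteor k then meteor
  else
    let a := PySem.Int.floordiv meteor 10
    let b := PySem.Int.mod meteor 10
    max (maxkd a k) (maxkd a (k - 1) * 10 + b)
termination_by meteor.natAbs
decreasing_by
  · exact floordiv10_natAbs_lt meteor (one_le_of_not_pyLtPow10 meteor k (by assumption))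
  · exact floordiv10_natAbs_lt meteor (one_le_of_not_pyLtPow10 meteor k (by assumption))

-- ===== PORT B =====
-- `while m: digits.append(m % 10); m //= 10` — here meteor > 0, so run on meteor.toNat (exact)
def digitsRevNat (n : Nat) : List Int :=
  if n = 0 then [] else ((n % 10 : Nat) : Int) :: digitsRevNat (n / 10)
termination_by n
decreasing_by exact Nat.div_lt_self (Nat.pos_of_ne_zero (by assumption)) (by norm_num)

-- the inner `for j in range(1, k + 1)` loop: builds new[0..N] with new[0] = 0
def dpNewRow (i pre d : Int) (row : List Int) (N : Nat) : List Int :=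
  0 :: (List.range N).map (fun (j0 : Nat) =>
    let j : Int := (j0 : Int) + 1
    if i ≤ j then pre
    else max (row.getD j.toNat 0) (row.getD (j.toNat - 1) 0 * 10 + d))

-- one iteration of the `for d in digits` loop; state = (i, pre, row)
def dpStep (N : Nat) (s : Int × Int × List Int) (d : Int) : Int × Int × List Int :=
  let i := s.1 + 1
  let pre := s.2.1 * 10 + d
  (i, pre, dpNewRow i pre d s.2.2 N)

def maxkd_alt (meteor : Int) (k : Int) : Int :=
  if k ≤ 0 then 0
  else if meteor < 10 ^ k.toNat then meteor
  else
    let digits := (digitsRevNat meteor.toNat).reverse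
    let s := digits.foldl (dpStep k.toNat) (0, 0, List.replicate (k.toNat + 1) 0)
    s.2.2.getD k.toNat 0

-- ===== PRECONDITION & SPEC =====
-- Pre_ excludes negative k (a negative length budget, outside the natural domain), where A's
-- result comes from comparing an int with the float 10**k — and where A recurses forever once
-- that float underflows to 0.0 (RecursionError); B returns 0 on all such inputs.
def Pre_maxkd (meteor : Int) (k : Int) : Prop := 0 ≤ k
instance (meteor : Int) (k : Int) : Decidable (Pre_maxkd meteor k) := by unfold Pre_maxkd; infer_instance
def pvWitness_maxkd : Int × Int := (32749, 2)

def Spec_maxkd (meteor : Int) (k : Int) (out : Int) : Prop := out = maxkd_alt meteor k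
instance (meteor : Int) (k : Int) (out : Int) : Decidable (Spec_maxkd meteor k out) := by unfold Spec_maxkd; infer_instance

-- ===== CLAIM (what is proved, stated in full; the proofs are below) =====
def Claim_equal_maxkd : Prop := ∀ (meteor : Int) (k : Int), Dom_maxkd meteor k → Pre_maxkd meteor k → Spec_maxkd meteor k (maxkd meteor k)

-- ===== LEMMAS AND PROOFS =====

lemma maxkd_k_zero (p : Int) : maxkd p 0 = 0 := by
  rw [maxkd.eq_def]; simp

lemma maxkd_zero_left (j : Nat) : maxkd 0 (j : Int) = 0 := by
  rw [maxkd.eq_def]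
  by_cases hj : (j : Int) = 0
  · rw [if_pos hj]
  · rw [if_neg hj, if_pos]
    unfold pyLtPow10
    rw [if_pos (by positivity)]
    simp [pow_pos]

lemma maxkd_small (p : Int) (j : Nat) (hj : 1 ≤ j) (h : p < 10 ^ j) : maxkd p (j : Int) = p := by
  rw [maxkd.eq_def, if_neg (by omega : ¬ (j : Int) = 0), if_pos]
  unfold pyLtPow10
  rw [if_pos (by positivity)]
  simpa using h

lemma maxkd_step (p d : Int) (i : Int) (hi : 1 ≤ i)
    (hp1 : 10 ^ (i.toNat - 1) ≤ p) (hp2 : p < 10 ^ i.toNat)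
    (hd0 : 0 ≤ d) (hd9 : d < 10) (j : Nat) (hj : 1 ≤ j) :
    maxkd (p * 10 + d) (j : Int) =
      if i + 1 ≤ (j : Int) then p * 10 + d
      else max (maxkd p (j : Int)) (maxkd p ((j : Int) - 1) * 10 + d) := by
  have hp0 : 1 ≤ p := le_trans (one_le_pow₀ (by norm_num)) hp1
  by_cases hij : i.toNat + 1 ≤ j
  · rw [if_pos (by omega)]
    have hlt : p * 10 + d < 10 ^ j := by
      have h1 : p * 10 + d < 10 ^ (i.toNat + 1) := by
        have := pow_succ (10 : Int) i.toNat
        nlinarith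
      have h2 : (10 : Int) ^ (i.toNat + 1) ≤ 10 ^ j := pow_le_pow_right₀ (by norm_num) hij
      omega
    exact maxkd_small _ j hj hlt
  · rw [if_neg (by omega)]
    have hji : j ≤ i.toNat := by omega
    have hge : 10 ^ j ≤ p * 10 + d := by
      have h1 : (10 : Int) ^ j ≤ 10 ^ i.toNat := pow_le_pow_right₀ (by norm_num) hji
      have h2 : (10 : Int) ^ i.toNat ≤ p * 10 := by
        have h3 : (10 : Int) ^ i.toNat = 10 ^ (i.toNat - 1) * 10 := by
          rw [← pow_succ]; congr 1; omega
        nlinarith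
      omega
    rw [maxkd.eq_def, if_neg (by omega : ¬ (j : Int) = 0), if_neg]
    · have hdiv : PySem.Int.floordiv (p * 10 + d) 10 = p := by
        rw [PySem.Int.floordiv_eq_ediv_of_pos (by norm_num)]; omega
      have hmod : PySem.Int.mod (p * 10 + d) 10 = d := by
        rw [PySem.Int.mod_eq_emod_of_pos (by norm_num)]; omega
      simp only [hdiv, hmod]
    · unfold pyLtPow10
      rw [if_pos (by positivity)]
      simp only [decide_eq_true_eq, Int.toNat_natCast]
      omega

lemma dp_pre (N : Nat) (ds : List Int) (s : Int × Int × List Int) :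
    (ds.foldl (dpStep N) s).2.1 = ds.foldl (fun p d => p * 10 + d) s.2.1 := by
  induction ds generalizing s with
  | nil => rfl
  | cons d ds ih => simpa [dpStep] using ih (dpStep N s d)

lemma dpNewRow_getD_succ (i pre d : Int) (row : List Int) (N : Nat) (j0 : Nat) (hj0 : j0 < N) :
    (dpNewRow i pre d row N).getD (j0 + 1) 0 =
      if i ≤ (j0 : Int) + 1 then pre
      else max (row.getD (j0 + 1) 0) (row.getD j0 0 * 10 + d) := by
  have hr : (List.range N)[j0]? = some j0 := by simp [hj0]
  unfold dpNewRow
  rw [List.getD_cons_succ, List.getD_eq_getElem?_getD, List.getElem?_map, hr]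
  simp only [Option.map_some, Option.getD_some]
  have ht : ((j0 : Int) + 1).toNat = j0 + 1 := by omega
  rw [ht]
  simp

lemma dp_loop (N : Nat) :
    ∀ (ds : List Int) (i p : Int) (row : List Int),
      (∀ d ∈ ds, 0 ≤ d ∧ d < 10) →
      ((i = 0 ∧ p = 0 ∧ 1 ≤ ds.headD 1) ∨
        (1 ≤ i ∧ 10 ^ (i.toNat - 1) ≤ p ∧ p < 10 ^ i.toNat)) →
      (∀ j : Nat, j ≤ N → row.getD j 0 = maxkd p (j : Int)) →
      ∀ j : Nat, j ≤ N →
        ((ds.foldl (dpStep N) (i, p, row)).2.2).getD j 0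
          = maxkd (ds.foldl (dpStep N) (i, p, row)).2.1 (j : Int) := by
  intro ds
  induction ds with
  | nil => intro i p row _ _ hrow j hj; exact hrow j hj
  | cons d ds ih =>
    intro i p row hds hinv hrow j hj
    have hd : 0 ≤ d ∧ d < 10 := hds d (by simp)
    have hstep : dpStep N (i, p, row) d
        = (i + 1, p * 10 + d, dpNewRow (i + 1) (p * 10 + d) d row N) := rfl
    rw [List.foldl_cons, hstep]
    -- new row correctness
    have hrow' : ∀ j : Nat, j ≤ N →
        (dpNewRow (i + 1) (p * 10 + d) d row N).getD j 0 = maxkd (p * 10 + d) (j : Int) := by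
      intro j hj
      cases j with
      | zero =>
        simp only [dpNewRow, List.getD_cons_zero, Nat.cast_zero]
        exact (maxkd_k_zero _).symm
      | succ j0 =>
        rw [dpNewRow_getD_succ _ _ _ _ _ j0 (by omega)]
        rcases hinv with ⟨hi0, hp0, hhead⟩ | ⟨hi1, hlo, hhi⟩
        · subst hi0; subst hp0
          have hd1 : 1 ≤ d := by simpa using hhead
          rw [if_pos (by omega : (0:Int) + 1 ≤ (j0 : Int) + 1)]
          have hlt : d < 10 ^ (j0 + 1) := by
            calc d < 10 ^ 1 := by omega
            _ ≤ 10 ^ (j0 + 1) := pow_le_pow_right₀ (by norm_num) (by omega)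
          have := maxkd_small d (j0 + 1) (by omega) hlt
          simpa using this.symm
        · rw [maxkd_step p d i hi1 hlo hhi hd.1 hd.2 (j0 + 1) (by omega)]
          rw [hrow (j0 + 1) (by omega), hrow j0 (by omega)]
          have hc1 : ((j0 + 1 : Nat) : Int) - 1 = (j0 : Int) := by push_cast; ring
          rw [hc1]
          have hc2 : ((j0 + 1 : Nat) : Int) = (j0 : Int) + 1 := by push_cast; ring
          rw [hc2]
    -- invariant for the new state
    have hinv' : ((i + 1 = 0 ∧ p * 10 + d = 0 ∧ 1 ≤ ds.headD 1) ∨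
        (1 ≤ i + 1 ∧ 10 ^ ((i + 1).toNat - 1) ≤ p * 10 + d ∧ p * 10 + d < 10 ^ (i + 1).toNat)) := by
      right
      rcases hinv with ⟨hi0, hp0, hhead⟩ | ⟨hi1, hlo, hhi⟩
      · subst hi0; subst hp0
        have hd1 : 1 ≤ d := by simpa using hhead
        refine ⟨by omega, ?_, ?_⟩
        · have e1 : (10 : Int) ^ (((0:Int) + 1).toNat - 1) = 1 := by norm_num
          rw [e1]; omega
        · have e2 : (10 : Int) ^ (((0:Int) + 1).toNat) = 10 := by norm_num
          rw [e2]; omega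
      · have ht : (i + 1).toNat = i.toNat + 1 := by omega
        have ht2 : (i.toNat + 1) - 1 = i.toNat := by omega
        rw [ht, ht2]
        have hpow : (10 : Int) ^ (i.toNat + 1) = 10 ^ i.toNat * 10 := pow_succ 10 i.toNat
        have hlo' : (10 : Int) ^ i.toNat ≤ p * 10 + d := by
          have : (10 : Int) ^ i.toNat = 10 ^ (i.toNat - 1) * 10 := by
            rw [← pow_succ]; congr 1; omega
          nlinarith
        refine ⟨by omega, hlo', by nlinarith⟩
    exact ih (i + 1) (p * 10 + d) _ (fun x hx => hds x (by simp [hx])) hinv' hrow' j hj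

lemma digitsRevNat_bounds : ∀ n : Nat, ∀ d ∈ digitsRevNat n, 0 ≤ d ∧ d < 10 := by
  intro n
  induction n using Nat.strong_induction_on with
  | _ n ih =>
    rw [digitsRevNat]
    split
    · simp
    · intro d hd
      rcases List.mem_cons.1 hd with h | h
      · subst h
        constructor
        · positivity
        · exact_mod_cast Nat.mod_lt n (by norm_num)
      · exact ih (n / 10) (Nat.div_lt_self (Nat.pos_of_ne_zero (by assumption)) (by norm_num)) d h

lemma digitsRevNat_val : ∀ n : Nat, ∀ c : Int,
    (digitsRevNat n).reverse.foldl (fun p d => p * 10 + d) c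
      = c * 10 ^ (digitsRevNat n).length + n := by
  intro n
  induction n using Nat.strong_induction_on with
  | _ n ih =>
    intro c
    rw [digitsRevNat]
    split
    · simp; omega
    · rename_i hn
      rw [List.reverse_cons, List.foldl_append]
      rw [ih (n / 10) (Nat.div_lt_self (Nat.pos_of_ne_zero hn) (by norm_num)) c]
      simp only [List.foldl_cons, List.foldl_nil, List.length_cons, pow_succ]
      have h1 : (((n / 10 : Nat)) : Int) * 10 + ((n % 10 : Nat) : Int) = (n : Int) := by
        have := Nat.div_add_mod n 10
        push_cast
        omega
      ring_nf
      ring_nf at h1 ⊢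
      nlinarith [h1]

lemma digitsRevNat_head : ∀ n : Nat, 1 ≤ n → 1 ≤ ((digitsRevNat n).reverse.headD 1) := by
  intro n
  induction n using Nat.strong_induction_on with
  | _ n ih =>
    intro hn
    rw [digitsRevNat]
    rw [if_neg (by omega)]
    rw [List.reverse_cons]
    by_cases h10 : n / 10 = 0
    · have : digitsRevNat (n / 10) = [] := by rw [digitsRevNat, if_pos h10]
      rw [this]
      simp only [List.reverse_nil, List.nil_append, List.headD]
      have : n % 10 = n := Nat.mod_eq_of_lt (by omega)
      rw [this]
      exact_mod_cast hn
    · have hne : digitsRevNat (n / 10) ≠ [] := by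
        rw [digitsRevNat, if_neg h10]; simp
      have hrne : (digitsRevNat (n / 10)).reverse ≠ [] := by simpa using hne
      have := ih (n / 10) (Nat.div_lt_self (by omega) (by norm_num)) (by omega)
      rcases List.exists_cons_of_ne_nil hrne with ⟨h, t, ht⟩
      rw [ht] at this ⊢
      simpa using this

-- ===== VERDICT (by name: the statement is the Claim_ definition above) =====
theorem maxkd_spec : Claim_equal_maxkd := by
  unfold Claim_equal_maxkd Spec_maxkd Pre_maxkd
  intro meteor k _ hk
  unfold maxkd_alt
  by_cases h0 : k ≤ 0
  · rw [if_pos h0]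
    have hk0 : k = 0 := by omega
    subst hk0
    exact maxkd_k_zero meteor
  · rw [if_neg h0]
    by_cases hsmall : meteor < 10 ^ k.toNat
    · rw [if_pos hsmall]
      rw [maxkd.eq_def, if_neg (by omega : ¬ k = 0), if_pos]
      unfold pyLtPow10
      rw [if_pos (by omega : (0:Int) ≤ k)]
      simpa using hsmall
    · rw [if_neg hsmall]
      have hN1 : 1 ≤ k.toNat := by omega
      have hm10 : 10 ≤ meteor := by
        have h1 : (10 : Int) ^ 1 ≤ 10 ^ k.toNat := pow_le_pow_right₀ (by norm_num) hN1
        omega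
      have hmt : ((meteor.toNat : Nat) : Int) = meteor := Int.toNat_of_nonneg (by omega)
      have hdig : ∀ d ∈ (digitsRevNat meteor.toNat).reverse, 0 ≤ d ∧ d < 10 := by
        intro d hd
        exact digitsRevNat_bounds meteor.toNat d (List.mem_reverse.1 hd)
      have hinv : ((0 : Int) = 0 ∧ (0 : Int) = 0 ∧ 1 ≤ ((digitsRevNat meteor.toNat).reverse.headD 1)) ∨
          (1 ≤ (0:Int) ∧ 10 ^ ((0:Int).toNat - 1) ≤ (0:Int) ∧ (0:Int) < 10 ^ (0:Int).toNat) :=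
        Or.inl ⟨rfl, rfl, digitsRevNat_head meteor.toNat (by omega)⟩
      have hrow0 : ∀ j : Nat, j ≤ k.toNat →
          (List.replicate (k.toNat + 1) (0:Int)).getD j 0 = maxkd 0 (j : Int) := by
        intro j hj
        rw [maxkd_zero_left]
        rcases Nat.lt_or_ge j (k.toNat + 1) with h | h
        · simp [List.getD_replicate]
        · omega
      have hfold := dp_loop k.toNat (digitsRevNat meteor.toNat).reverse 0 0
        (List.replicate (k.toNat + 1) 0) hdig hinv hrow0 k.toNat le_rfl
      have hpref : (((digitsRevNat meteor.toNat).reverse.foldl (dpStep k.toNat)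
          (0, 0, List.replicate (k.toNat + 1) 0))).2.1 = meteor := by
        rw [dp_pre]
        have := digitsRevNat_val meteor.toNat 0
        simpa [hmt] using this
      rw [hfold, hpref]
      congr 1
      omega
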